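-- pv_equiv track=rewrite | github.com/UMN-Choi-Lab/TrajFlow | model/encoder/GRU.py | _next_map
-- ===== SOURCE A (Python) =====
-- def _next_map(mask, seq_len):
-- 	n = 0
-- 	next_map = {}
-- 	for i in range(seq_len  - 1, -1, -1):
-- 		if mask[i] == 0:
-- 			n = i
-- 		else:
-- 			next_map[i] = n
-- 	return next_map
-- ===== SOURCE B (Python) =====
-- def _next_map(mask, seq_len):
-- 	pending = []
-- 	out = []
-- 	for i in range(seq_len):
-- 		if mask[i] == 0:
-- 			for p in pending:
-- 				out.append((p, i))
-- 			pending = []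
-- 		else:
-- 			pending.append(i)
-- 	for p in pending:
-- 		out.append((p, 0))
-- 	return dict(reversed(out))
-- ===== Notes on version B (the rewrite author's own statement) =====
-- stated objective: alternative
-- what changed: Replaced the backward scan that threads the 'latest masked index' state with a forward pass keeping a pending buffer of unmatched unmasked indices, flushed in batch at each masked index (and with the 0 default at the end), the pair list being reversed once at the end to rebuild the dict in A's insertion order.
import Mathlib
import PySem

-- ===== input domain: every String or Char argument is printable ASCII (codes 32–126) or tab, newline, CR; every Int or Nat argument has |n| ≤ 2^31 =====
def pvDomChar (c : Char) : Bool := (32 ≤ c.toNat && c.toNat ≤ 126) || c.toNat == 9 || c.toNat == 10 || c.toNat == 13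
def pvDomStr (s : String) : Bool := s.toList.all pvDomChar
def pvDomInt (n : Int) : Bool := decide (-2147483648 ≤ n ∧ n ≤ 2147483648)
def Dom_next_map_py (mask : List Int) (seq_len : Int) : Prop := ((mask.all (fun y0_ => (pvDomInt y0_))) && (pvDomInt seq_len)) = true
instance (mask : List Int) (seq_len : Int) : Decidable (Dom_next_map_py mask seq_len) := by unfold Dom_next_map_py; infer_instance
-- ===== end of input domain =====

-- B replaces A's backward scan threading a "latest masked index" state by a forward pass with a
-- pending buffer flushed at each masked index, reversing the collected pairs once at the end
-- (objective: alternative; same cost).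


-- ===== PORT A =====
-- A's loop: for i in range(seq_len-1, -1, -1): if mask[i]==0: n=i else: next_map[i]=n
-- state = (n, next_map); mask[i] is pyGetD (valid under Pre_, which puts every i in range).
def next_map_py (mask : List Int) (seq_len : Int) : List (Int × Int) :=
  let st :=
    (PySem.List.pyRange (seq_len - 1) (-1) (-1)).foldl
      (fun (st : Int × PySem.Dict Int Int) i =>
        if PySem.List.pyGetD mask i 0 == 0 then (i, st.2)
        else (st.1, st.2.insert i st.1))
      (0, PySem.Dict.empty)
  st.2.items

-- ===== PORT B =====
-- B's loop: forward over range(seq_len), state = (pending, out); flush pending when mask[i]==0;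
-- final flush with default 0; then dict(reversed(out)).
def next_map_py_alt (mask : List Int) (seq_len : Int) : List (Int × Int) :=
  let st :=
    (PySem.List.pyRange 0 seq_len 1).foldl
      (fun (st : List Int × List (Int × Int)) i =>
        if PySem.List.pyGetD mask i 0 == 0 then ([], st.2 ++ st.1.map (fun p => (p, i)))
        else (st.1 ++ [i], st.2))
      ([], [])
  (PySem.Dict.ofList ((st.2 ++ st.1.map (fun p => (p, (0 : Int)))).reverse)).items

-- ===== PRECONDITION & SPEC =====
-- Pre_ excludes exactly the inputs where A raises IndexError: some i in range(seq_len) with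
-- i >= len(mask) (since mask.length ≥ 0, 'seq_len ≤ mask.length' also admits every seq_len ≤ 0,
-- where the loop is empty and A returns {}).
def Pre_next_map_py (mask : List Int) (seq_len : Int) : Prop := seq_len ≤ (mask.length : Int)
instance (mask : List Int) (seq_len : Int) : Decidable (Pre_next_map_py mask seq_len) := by unfold Pre_next_map_py; infer_instance
def pvWitness_next_map_py : List Int × Int := ([1, 0, 1, 1, 0, 1], 6)

def Spec_next_map_py (mask : List Int) (seq_len : Int) (out : List (Int × Int)) : Prop := out = next_map_py_alt mask seq_len
instance (mask : List Int) (seq_len : Int) (out : List (Int × Int)) : Decidable (Spec_next_map_py mask seq_len out) := by unfold Spec_next_map_py; infer_instance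

-- ===== CLAIM (what is proved, stated in full; the proofs are below) =====
def Claim_equal_next_map_py : Prop := ∀ (mask : List Int) (seq_len : Int), Dom_next_map_py mask seq_len → Pre_next_map_py mask seq_len → Spec_next_map_py mask seq_len (next_map_py mask seq_len)

-- ===== LEMMAS AND PROOFS =====

-- Abbreviations for the two loop bodies and loop states (proof-side only).
def pvStepA (mask : List Int) (st : Int × PySem.Dict Int Int) (i : Int) : Int × PySem.Dict Int Int :=
  if PySem.List.pyGetD mask i 0 == 0 then (i, st.2) else (st.1, st.2.insert i st.1)

def pvStepB (mask : List Int) (st : List Int × List (Int × Int)) (i : Int) : List Int × List (Int × Int) :=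
  if PySem.List.pyGetD mask i 0 == 0 then ([], st.2 ++ st.1.map (fun p => (p, i)))
  else (st.1 ++ [i], st.2)

def pvB (mask : List Int) (k : Nat) : List Int × List (Int × Int) :=
  (PySem.List.pyRange 0 (k : Int) 1).foldl (pvStepB mask) ([], [])

-- The collected pair list of B after k forward steps, with default n0 for the still-pending indices.
def pvOut (mask : List Int) (k : Nat) (n0 : Int) : List (Int × Int) :=
  (pvB mask k).2 ++ (pvB mask k).1.map (fun p => (p, n0))

lemma pvB_succ (mask : List Int) (k : Nat) :
    pvB mask (k + 1) = pvStepB mask (pvB mask k) (k : Int) := by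
  unfold pvB
  push_cast
  rw [PySem.List.pyRange_one_succ_right (by exact_mod_cast Nat.zero_le k), List.foldl_append]
  rfl

-- Core invariant: the descending A-loop over [k-1 … 0], started with default n0 and a dict d whose
-- keys are all ≥ k, produces d.items followed by the reverse of B's collected pairs.
lemma pvMain (mask : List Int) (k : Nat) (n0 : Int) (d : PySem.Dict Int Int)
    (hd : ∀ p ∈ d.items, (k : Int) ≤ p.1) :
    (((PySem.List.pyRange ((k : Int) - 1) (-1) (-1)).foldl (pvStepA mask) (n0, d)).2).items
      = d.items ++ (pvOut mask k n0).reverse := by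
  induction k generalizing n0 d with
  | zero =>
      rw [show ((0 : Nat) : Int) - 1 = -1 by norm_num,
          PySem.List.pyRange_neg_one_eq_nil (le_refl (-1))]
      simp [pvOut, pvB, PySem.List.pyRange_one_eq_nil (le_refl 0)]
  | succ k ih =>
      have hcons : PySem.List.pyRange (((k : Nat) + 1 : Nat) - 1) (-1) (-1)
          = (k : Int) :: PySem.List.pyRange ((k : Int) - 1) (-1) (-1) := by
        rw [show (((k : Nat) + 1 : Nat) : Int) - 1 = (k : Int) by push_cast; ring,
            PySem.List.pyRange_neg_one_cons (by omega)]
      rw [hcons]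
      simp only [List.foldl_cons]
      by_cases h0 : mask[k]?.getD 0 = (0 : Int)
      · -- mask[k] == 0 : A sets n := k, B flushes pending with value k
        have hstep : pvStepA mask (n0, d) (k : Int) = ((k : Int), d) := by
          simp [pvStepA, h0]
        rw [hstep, ih (k : Int) d (fun p hp => le_trans (by omega) (hd p hp))]
        have hB : pvB mask (k + 1)
            = ([], (pvB mask k).2 ++ (pvB mask k).1.map (fun p => (p, (k : Int)))) := by
          rw [pvB_succ]; simp [pvStepB, h0]
        simp [pvOut, hB]
      · -- mask[k] != 0 : A inserts (k, n0) under a fresh key, B appends k to pending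
        have hnc : d.contains (k : Int) = false := by
          by_contra hc
          have hc' : d.contains (k : Int) = true := by
            cases h : d.contains (k : Int) with
            | false => exact absurd h hc
            | true => rfl
          have hk : (k : Int) ∈ d.keys := (PySem.Dict.contains_iff_mem_keys d (k : Int)).mp hc'
          simp only [PySem.Dict.keys, List.mem_map] at hk
          obtain ⟨p, hp, hpk⟩ := hk
          have := hd p hp
          omega
        have hstep : pvStepA mask (n0, d) (k : Int) = (n0, d.insert (k : Int) n0) := by
          simp [pvStepA, h0]
        have hkeys : ∀ p ∈ (d.insert (k : Int) n0).items, (k : Int) ≤ p.1 := by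
          intro p hp
          rw [PySem.Dict.items_insert_of_not_contains d n0 hnc] at hp
          rcases List.mem_append.mp hp with h | h
          · exact le_trans (by omega) (hd p h)
          · rw [List.mem_singleton] at h
            subst h
            exact le_refl _
        rw [hstep, ih n0 _ hkeys, PySem.Dict.items_insert_of_not_contains d n0 hnc]
        have hB : pvB mask (k + 1) = ((pvB mask k).1 ++ [(k : Int)], (pvB mask k).2) := by
          rw [pvB_succ]; simp [pvStepB, h0]
        simp [pvOut, hB, List.append_assoc]

-- Each A-loop step either keeps the dict or inserts into it.
lemma pvStepA_dict (mask : List Int) (s : Int × PySem.Dict Int Int) (i : Int) :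
    (pvStepA mask s i).2 = s.2 ∨ (pvStepA mask s i).2 = s.2.insert i s.1 := by
  unfold pvStepA
  by_cases h0 : PySem.List.pyGetD mask i 0 == 0
  · left; rw [if_pos h0]
  · right; rw [if_neg h0]

-- Any prefix of the A-loop keeps the dict's keys Nodup.
lemma pvNodupA (mask : List Int) (l : List Int) (s : Int × PySem.Dict Int Int)
    (hs : s.2.keys.Nodup) : ((l.foldl (pvStepA mask) s).2).keys.Nodup := by
  induction l generalizing s with
  | nil => exact hs
  | cons i l ih =>
      simp only [List.foldl_cons]
      apply ih
      rcases pvStepA_dict mask s i with h | h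
      · rw [h]; exact hs
      · rw [h]; exact PySem.Dict.nodup_keys_insert _ _ _ hs

-- dict(pairs) with Nodup keys lists exactly those pairs, in order.
lemma pvOfListItems (l : List (Int × Int)) (h : (l.map Prod.fst).Nodup) :
    (PySem.Dict.ofList l).items = l := by
  have hfresh : ∀ a ∈ l, (PySem.Dict.empty : PySem.Dict Int Int).contains a.1 = false := by
    intro a _; exact PySem.Dict.contains_empty a.1
  have h2 := PySem.Dict.items_foldl_insert_fresh l (fun p => p.1) (fun p => p.2)
      (PySem.Dict.empty : PySem.Dict Int Int) hfresh h
  have h3 : (PySem.Dict.ofList l) = l.foldl (fun d p => d.insert p.1 p.2) PySem.Dict.empty := rfl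
  rw [h3]
  simpa using h2

lemma pvEquiv (mask : List Int) (seq_len : Int) :
    next_map_py mask seq_len = next_map_py_alt mask seq_len := by
  by_cases hle : seq_len ≤ 0
  · -- empty loops on both sides
    unfold next_map_py next_map_py_alt
    rw [PySem.List.pyRange_neg_one_eq_nil (by omega),
        PySem.List.pyRange_one_eq_nil (by omega)]
    rfl
  · have hsk : seq_len = ((seq_len.toNat : Nat) : Int) := by omega
    set k : Nat := seq_len.toNat with hk
    have hempty : (PySem.Dict.empty : PySem.Dict Int Int).items = [] := rfl
    have hmain := pvMain mask k 0 PySem.Dict.empty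
      (by intro p hp; rw [hempty] at hp; exact absurd hp (List.not_mem_nil))
    rw [hempty, List.nil_append] at hmain
    have hNodup : ((pvOut mask k 0).reverse.map Prod.fst).Nodup := by
      have h1 := pvNodupA mask (PySem.List.pyRange ((k : Int) - 1) (-1) (-1))
        (0, PySem.Dict.empty) PySem.Dict.nodup_keys_empty
      simp only [PySem.Dict.keys] at h1
      rw [hmain] at h1
      exact h1
    have hA0 : next_map_py mask ((k : Nat) : Int)
        = (((PySem.List.pyRange ((k : Int) - 1) (-1) (-1)).foldl (pvStepA mask)
            (0, PySem.Dict.empty)).2).items := rfl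
    have hB0 : next_map_py_alt mask ((k : Nat) : Int)
        = (PySem.Dict.ofList (pvOut mask k 0).reverse).items := rfl
    rw [hsk, hA0, hmain, hB0, pvOfListItems _ hNodup]

-- ===== VERDICT (by name: the statement is the Claim_ definition above) =====
theorem next_map_py_spec : Claim_equal_next_map_py := by
  intro mask seq_len _ _
  unfold Spec_next_map_py
  exact pvEquiv mask seq_len
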